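-- pv_equiv track=rewrite | github.com/vvn-hsu/modoya | module.py | get_available_options
-- ===== SOURCE A (Python) =====
-- def get_available_options(items):
--     options = {
--         'style': set(),
--         'color': set(),
--         'season': set(),
--         'category': set()
--     }
--     for item in items:
--         metadata = item['metadata']
--         options['style'].add(metadata.get('style', 'N/A'))
--         options['color'].add(metadata.get('color', 'N/A'))
--         options['season'].add(metadata.get('season', 'N/A'))
--         options['category'].add(metadata.get('category', 'N/A'))
--     return {k: sorted(list(v)) for k, v in options.items()}
-- ===== SOURCE B (Python) =====
-- def get_available_options(items):
--     items = list(items)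
--     result = {}
--     for key in ('style', 'color', 'season', 'category'):
--         vals = sorted(it['metadata'].get(key, 'N/A') for it in items)
--         distinct = []
--         for v in vals:
--             if not distinct or distinct[-1] != v:
--                 distinct.append(v)
--         result[key] = distinct
--     return result
-- ===== Notes on version B (the rewrite author's own statement) =====
-- stated objective: alternative
-- what changed: B never builds hash sets: per field it sorts the raw value list (duplicates included) and removes adjacent duplicates in one linear scan, instead of A's fan-out pass that accumulates four hash sets and then sorts each distinct-value set.
import Mathlib
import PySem

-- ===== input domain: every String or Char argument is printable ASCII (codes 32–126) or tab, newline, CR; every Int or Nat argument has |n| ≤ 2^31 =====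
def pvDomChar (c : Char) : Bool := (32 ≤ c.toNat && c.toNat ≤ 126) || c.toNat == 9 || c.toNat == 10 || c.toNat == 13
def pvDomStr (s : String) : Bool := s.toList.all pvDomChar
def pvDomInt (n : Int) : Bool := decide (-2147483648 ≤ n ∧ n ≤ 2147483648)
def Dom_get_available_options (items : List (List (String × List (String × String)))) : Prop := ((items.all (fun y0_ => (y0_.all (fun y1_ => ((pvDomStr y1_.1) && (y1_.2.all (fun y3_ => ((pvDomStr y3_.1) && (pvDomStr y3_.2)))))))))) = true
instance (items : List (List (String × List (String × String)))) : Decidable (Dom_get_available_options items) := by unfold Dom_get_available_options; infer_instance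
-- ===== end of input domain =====

-- B sorts the raw per-field value list (duplicates included) and drops adjacent duplicates
-- in one linear scan, instead of A's hash-set fan-out pass followed by sorting each set. Alternative, same cost.

-- metadata.get(k, 'N/A') on an item's 'metadata' dict (total form; Pre_ excludes a missing 'metadata' key)
def pvMetaGet (it : List (String × List (String × String))) (k : String) : String :=
  PySem.Dict.getD (PySem.Dict.mk (((PySem.Dict.mk it).get? "metadata").getD [])) k "N/A"

-- ===== PORT A =====
def get_available_options (items : List (List (String × List (String × String)))) : List (String × List String) :=
  let options :=
    items.foldl
      (fun (o : PySem.Set String × PySem.Set String × PySem.Set String × PySem.Set String) item =>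
        (PySem.Set.add o.1 (pvMetaGet item "style"),
         PySem.Set.add o.2.1 (pvMetaGet item "color"),
         PySem.Set.add o.2.2.1 (pvMetaGet item "season"),
         PySem.Set.add o.2.2.2 (pvMetaGet item "category")))
      (PySem.Set.empty, PySem.Set.empty, PySem.Set.empty, PySem.Set.empty)
  [("style", PySem.List.sorted options.1 (fun x => x) false),
   ("color", PySem.List.sorted options.2.1 (fun x => x) false),
   ("season", PySem.List.sorted options.2.2.1 (fun x => x) false),
   ("category", PySem.List.sorted options.2.2.2 (fun x => x) false)]

-- ===== PORT B =====
-- the inner 'for v in vals: if not distinct or distinct[-1] != v: distinct.append(v)' loop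
def pvDedupStep (distinct : List String) (v : String) : List String :=
  if distinct.getLast? = some v then distinct else distinct ++ [v]

def get_available_options_alt (items : List (List (String × List (String × String)))) : List (String × List String) :=
  ["style", "color", "season", "category"].foldl
    (fun result key =>
      let vals := PySem.List.sorted (items.map (fun it => pvMetaGet it key)) (fun x => x) false
      result ++ [(key, vals.foldl pvDedupStep [])])
    []

-- ===== PRECONDITION & SPEC =====
-- Pre_ excludes items missing the 'metadata' key, on which the Python A (and B) raises KeyError.
def Pre_get_available_options (items : List (List (String × List (String × String)))) : Prop :=
  (items.all (fun it => (PySem.Dict.mk it).contains "metadata")) = true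
instance (items : List (List (String × List (String × String)))) : Decidable (Pre_get_available_options items) := by unfold Pre_get_available_options; infer_instance
def pvWitness_get_available_options : (List (List (String × List (String × String)))) :=
  [[("metadata", [("style", "boho"), ("color", "red")])], [("metadata", [("season", "summer")])]]
def Spec_get_available_options (items : List (List (String × List (String × String)))) (out : List (String × List String)) : Prop := out = get_available_options_alt items
instance (items : List (List (String × List (String × String)))) (out : List (String × List String)) : Decidable (Spec_get_available_options items out) := by unfold Spec_get_available_options; infer_instance

-- ===== CLAIM (what is proved, stated in full; the proofs are below) =====
def Claim_equal_get_available_options : Prop := ∀ (items : List (List (String × List (String × String)))), Dom_get_available_options items → Pre_get_available_options items → Spec_get_available_options items (get_available_options items)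

-- ===== LEMMAS AND PROOFS =====

-- A's simultaneous four-set fold splits into four independent per-field folds.
theorem foldl_four_split (items : List (List (String × List (String × String))))
    (a b c d : PySem.Set String) :
    items.foldl
      (fun (o : PySem.Set String × PySem.Set String × PySem.Set String × PySem.Set String) item =>
        (PySem.Set.add o.1 (pvMetaGet item "style"),
         PySem.Set.add o.2.1 (pvMetaGet item "color"),
         PySem.Set.add o.2.2.1 (pvMetaGet item "season"),
         PySem.Set.add o.2.2.2 (pvMetaGet item "category"))) (a, b, c, d)
    = (items.foldl (fun s it => PySem.Set.add s (pvMetaGet it "style")) a,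
       items.foldl (fun s it => PySem.Set.add s (pvMetaGet it "color")) b,
       items.foldl (fun s it => PySem.Set.add s (pvMetaGet it "season")) c,
       items.foldl (fun s it => PySem.Set.add s (pvMetaGet it "category")) d) := by
  induction items generalizing a b c d with
  | nil => rfl
  | cons x xs ih => simp [List.foldl, ih]

-- each per-field fold from the empty set is set(map f items) in first-occurrence order
theorem foldl_add_eq_ofList_map (items : List (List (String × List (String × String)))) (k : String) :
    items.foldl (fun s it => PySem.Set.add s (pvMetaGet it k)) PySem.Set.empty
    = PySem.Set.ofList (items.map (fun it => pvMetaGet it k)) := by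
  rw [PySem.Set.ofList_eq_foldl, List.foldl_map]
  rfl

-- membership through B's adjacent-dedup scan
theorem mem_foldl_dedupStep (ys : List String) (acc : List String) (x : String) :
    x ∈ ys.foldl pvDedupStep acc ↔ x ∈ acc ∨ x ∈ ys := by
  induction ys generalizing acc with
  | nil => simp
  | cons y ys ih =>
    simp only [List.foldl, ih, List.mem_cons]
    unfold pvDedupStep
    split
    · rename_i h
      have hy : y ∈ acc := List.mem_of_getLast? h
      constructor
      · tauto
      · rintro (h' | h' | h') <;> [tauto; (subst h'; tauto); tauto]
    · simp only [List.mem_append, List.mem_singleton]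
      tauto
-- every element of an acc that is Pairwise (<) is ≤ its last element
theorem le_getLast_of_pairwise_lt (acc : List String) (hp : acc.Pairwise (· < ·))
    (a : String) (ha : a ∈ acc) (l : String) (hl : acc.getLast? = some l) : a ≤ l := by
  induction acc with
  | nil => cases ha
  | cons c cs ih =>
    cases cs with
    | nil =>
      rw [List.mem_singleton] at ha; subst ha
      simp only [List.getLast?_singleton, Option.some.injEq] at hl; subst hl
      exact le_refl _
    | cons d ds =>
      have hl' : (d :: ds).getLast? = some l := by rw [List.getLast?_cons_cons] at hl; exact hl
      rcases List.mem_cons.mp ha with rfl | ha'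
      · have : l ∈ d :: ds := List.mem_of_getLast? hl'
        exact le_of_lt ((List.pairwise_cons.mp hp).1 l this)
      · exact ih (List.pairwise_cons.mp hp).2 ha' hl'

-- the scan over a ≤-sorted list yields a strictly increasing list
theorem pairwise_foldl_dedupStep (ys : List String) (acc : List String)
    (hacc : acc.Pairwise (· < ·)) (hys : ys.Pairwise (· ≤ ·))
    (hsep : ∀ a ∈ acc, ∀ b ∈ ys, a ≤ b) :
    (ys.foldl pvDedupStep acc).Pairwise (· < ·) := by
  induction ys generalizing acc with
  | nil => exact hacc
  | cons y ys ih =>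
    have hys' := (List.pairwise_cons.mp hys).2
    have hyle := (List.pairwise_cons.mp hys).1
    simp only [List.foldl]
    have hstep : pvDedupStep acc y = if acc.getLast? = some y then acc else acc ++ [y] := rfl
    rw [hstep]
    by_cases hne : acc.getLast? = some y
    · rw [if_pos hne]
      exact ih acc hacc hys' (fun a ha b hb => hsep a ha b (List.mem_cons_of_mem _ hb))
    · rw [if_neg hne]
      apply ih
      · rw [List.pairwise_append]
        refine ⟨hacc, List.pairwise_singleton _ _, ?_⟩
        intro a ha b hb
        rw [List.mem_singleton] at hb
        rw [hb]
        cases hlast : acc.getLast? with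
        | none => simp [List.getLast?_eq_none_iff] at hlast; subst hlast; cases ha
        | some l =>
          have hl_mem : l ∈ acc := List.mem_of_getLast? hlast
          have h1 : a ≤ l := le_getLast_of_pairwise_lt acc hacc a ha l hlast
          have h2 : l ≤ y := hsep l hl_mem y (List.mem_cons_self)
          have h3 : l ≠ y := fun h => hne (by rw [hlast, h])
          exact lt_of_le_of_lt h1 (lt_of_le_of_ne h2 h3)
      · exact hys'
      · intro a ha b hb
        rcases List.mem_append.mp ha with ha' | ha'
        · exact hsep a ha' b (List.mem_cons_of_mem _ hb)
        · rw [List.mem_singleton] at ha'; subst ha'; exact hyle b hb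

-- per field: sorted(set(vs)) = adjacent-dedup of sorted(vs)
theorem sorted_ofList_eq_dedup_sorted (vs : List String) :
    PySem.List.sorted (PySem.Set.ofList vs) (fun x => x) false
    = (PySem.List.sorted vs (fun x => x) false).foldl pvDedupStep [] := by
  apply PySem.List.sorted_eq_of_perm_of_pairwise_lt
  · apply (List.perm_ext_iff_of_nodup ?_ (PySem.Set.nodup_ofList vs)).mpr
    · intro a
      rw [mem_foldl_dedupStep, PySem.List.mem_sorted, PySem.Set.mem_ofList]
      simp
    · exact (pairwise_foldl_dedupStep _ [] (List.Pairwise.nil)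
        (PySem.List.sorted_pairwise vs (fun x => x) ) (by simp)).nodup
  · exact pairwise_foldl_dedupStep _ [] (List.Pairwise.nil)
      (PySem.List.sorted_pairwise vs (fun x => x)) (by simp)

-- ===== VERDICT (by name: the statement is the Claim_ definition above) =====
theorem get_available_options_spec : Claim_equal_get_available_options := by
  intro items _ _
  show get_available_options items = get_available_options_alt items
  unfold get_available_options get_available_options_alt
  rw [foldl_four_split]
  simp only [List.foldl, List.nil_append, foldl_add_eq_ofList_map, sorted_ofList_eq_dedup_sorted]
  simp
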